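-- pv_equiv track=rewrite | github.com/raeez/chiral-bar-cobar | compute/lib/pbw_holonomy.py | sl2_bar_dims
-- ===== SOURCE A (Python) =====
-- from typing import Dict, List, Tuple
--
-- def sl2_bar_dims(n_max: int) -> List[int]:
--     """dim H^n(bar(sl₂_hat)) for n = 1, ..., n_max.
--
--     Uses Riordan R(n+3) with degree-2 correction (R(5)=6→5).
--     Recurrence: (k+1)R(k) = (k-1)(2R(k-1) + 3R(k-2)) for k >= 2.
--     Values: 3, 5, 15, 36, 91, 232, 603, 1585, ...
--     """
--     R = [1, 0, 1]  # R(0)=1, R(1)=0, R(2)=1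
--     for k in range(3, n_max + 4):
--         num = (k - 1) * (2 * R[k - 1] + 3 * R[k - 2])
--         R.append(num // (k + 1))
--     dims = []
--     for n in range(1, n_max + 1):
--         val = R[n + 3]
--         if n == 2:
--             val = 5  # Corrected: R(5)=6, but H²=5
--         dims.append(val)
--     return dims
-- ===== SOURCE B (Python) =====
-- def sl2_bar_dims(n_max: int):
--     """dim H^n(bar(sl2_hat)) for n = 1..n_max, computed via the Motzkin numbers:
--     build M(0..n_max+2) by the Motzkin recurrence (k+2)M(k) = (2k+1)M(k-1) + 3(k-1)M(k-2),
--     then recover the Riordan numbers by the alternating transform R(q) = M(q-1) - R(q-1)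
--     (R(0) = 1), emitting R(n+3) for n = 1..n_max with the H^2 correction at n = 2."""
--     motzkin = [1, 1]
--     for k in range(2, n_max + 3):
--         motzkin.append(((2 * k + 1) * motzkin[k - 1] + 3 * (k - 1) * motzkin[k - 2]) // (k + 2))
--     dims = []
--     r = 1
--     for q in range(1, n_max + 4):
--         r = motzkin[q - 1] - r
--         if q >= 4:
--             dims.append(5 if q == 5 else r)
--     return dims
-- ===== Notes on version B (the rewrite author's own statement) =====
-- stated objective: alternative
-- what changed: Instead of A's direct Riordan recurrence (k-1)(2R(k-1)+3R(k-2))//(k+1) building the R list and indexing R[n+3], B computes the Motzkin numbers M(0..n_max+2) by their own recurrence (2k+1)M(k-1)+3(k-1)M(k-2))//(k+2) and recovers each output by the alternating transform R(q) = M(q-1) - R(q-1), emitting R(n+3) on the fly; the proof goes through the closed form R(m) = sum_k (-1)^(m-k) C(m,k) Catalan(k) and a WZ-certificate telescoping identity.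
import Mathlib
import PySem

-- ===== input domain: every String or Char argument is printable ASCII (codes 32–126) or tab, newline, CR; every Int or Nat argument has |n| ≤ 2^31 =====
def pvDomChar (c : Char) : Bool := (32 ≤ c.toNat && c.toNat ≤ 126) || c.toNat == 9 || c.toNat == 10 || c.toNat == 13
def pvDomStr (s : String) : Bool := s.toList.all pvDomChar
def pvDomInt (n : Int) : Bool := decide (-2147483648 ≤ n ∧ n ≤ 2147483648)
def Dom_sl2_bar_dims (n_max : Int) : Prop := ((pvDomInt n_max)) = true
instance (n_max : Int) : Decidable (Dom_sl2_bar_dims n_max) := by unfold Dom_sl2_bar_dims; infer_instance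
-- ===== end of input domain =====

-- B replaces A's direct Riordan recurrence (build the R list by
-- (k-1)(2R(k-1)+3R(k-2))//(k+1), then index R[n+3]) by building the Motzkin numbers
-- by THEIR recurrence and recovering each output by the alternating transform
-- R(q) = M(q-1) - R(q-1); the equivalence is proved through the closed form
-- R(m) = Σ_k (-1)^(m-k) C(m,k) Catalan(k) and a WZ telescoping identity; objective: alternative.

-- ===== PORT A =====
-- Literal port of A: first loop appends R(k) = (k-1)*(2*R[k-1]+3*R[k-2]) // (k+1) to the
-- list R = [1,0,1]; second loop reads R[n+3] and replaces the value by 5 at n = 2.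
-- The list indices k-1, k-2 and n+3 are always in range in A's Python (no IndexError),
-- so pyGetD with default 0 is exact here.
def sl2_bar_dims (n_max : Int) : List Int :=
  let R := (PySem.List.pyRange 3 (n_max + 4) 1).foldl
    (fun R k =>
      let num := (k - 1) * (2 * PySem.List.pyGetD R (k - 1) 0 + 3 * PySem.List.pyGetD R (k - 2) 0)
      R ++ [PySem.Int.floordiv num (k + 1)])
    [1, 0, 1]
  (PySem.List.pyRange 1 (n_max + 1) 1).foldl
    (fun dims n =>
      let val := PySem.List.pyGetD R (n + 3) 0
      dims ++ [if n = 2 then 5 else val])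
    []

-- ===== PORT B =====
-- Literal port of Source B: first loop appends M(k) = ((2k+1)*M[k-1] + 3(k-1)*M[k-2]) // (k+2)
-- to the Motzkin list [1, 1]; second loop runs r = motzkin[q-1] - r and, for q >= 4,
-- appends r (with 5 substituted at q = 5).  Indices q-1, k-1, k-2 are always in range in
-- Source B's Python, so pyGetD with default 0 is exact here.
def sl2_bar_dims_alt (n_max : Int) : List Int :=
  let motzkin := (PySem.List.pyRange 2 (n_max + 3) 1).foldl
    (fun motzkin k =>
      motzkin ++ [PySem.Int.floordiv
        ((2 * k + 1) * PySem.List.pyGetD motzkin (k - 1) 0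
          + 3 * (k - 1) * PySem.List.pyGetD motzkin (k - 2) 0) (k + 2)])
    [1, 1]
  ((PySem.List.pyRange 1 (n_max + 4) 1).foldl
    (fun (st : List Int × Int) q =>
      let r := PySem.List.pyGetD motzkin (q - 1) 0 - st.2
      (if 4 ≤ q then st.1 ++ [if q = 5 then 5 else r] else st.1, r))
    ([], 1)).1

-- ===== PRECONDITION & SPEC =====
def Spec_sl2_bar_dims (n_max : Int) (out : List Int) : Prop := out = sl2_bar_dims_alt n_max
instance (n_max : Int) (out : List Int) : Decidable (Spec_sl2_bar_dims n_max out) := by unfold Spec_sl2_bar_dims; infer_instance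

-- ===== CLAIM (what is proved, stated in full; the proofs are below) =====
def Claim_equal_sl2_bar_dims : Prop := ∀ (n_max : Int), Dom_sl2_bar_dims n_max → Spec_sl2_bar_dims n_max (sl2_bar_dims n_max)

-- ===== LEMMAS AND PROOFS =====

-- The value sequence of A's first loop: rr k = R(k).
def rr : Nat → Int
  | 0 => 1
  | 1 => 0
  | 2 => 1
  | (k+3) => PySem.Int.floordiv (((k : Int) + 2) * (2 * rr (k+2) + 3 * rr (k+1))) ((k : Int) + 4)

-- The signed Catalan binomial transform T(m) = Σ_{k=0}^m (-1)^k C(m,k) Catalan(k);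
-- the Riordan number computed by both programs is S(m) = (-1)^m T(m).
def Tz (m : Nat) : Int :=
  ∑ k ∈ Finset.range (m + 1), (-1 : Int) ^ k * (Nat.choose m k : Int) * (catalan k : Int)

def Sz (m : Nat) : Int := (-1 : Int) ^ m * Tz m

-- Catalan P-recurrence (k+2)·Cat(k+1) = (4k+2)·Cat(k), from Mathlib's central-binomial facts.
theorem catRec (k : Nat) : (k + 2) * catalan (k + 1) = (4 * k + 2) * catalan k := by
  have h1 := succ_mul_catalan_eq_centralBinom k
  have h2 := succ_mul_catalan_eq_centralBinom (k + 1)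
  have h3 := Nat.succ_mul_centralBinom_succ k
  have key : (k + 1) * ((k + 2) * catalan (k + 1)) = (k + 1) * ((4 * k + 2) * catalan k) := by
    calc (k + 1) * ((k + 2) * catalan (k + 1))
        = (k + 1) * ((k + 1 + 1) * catalan (k + 1)) := by ring_nf
      _ = (k + 1) * Nat.centralBinom (k + 1) := by rw [h2]
      _ = 2 * (2 * k + 1) * Nat.centralBinom k := h3
      _ = 2 * (2 * k + 1) * ((k + 1) * catalan k) := by rw [h1]
      _ = (k + 1) * ((4 * k + 2) * catalan k) := by ring
  exact Nat.eq_of_mul_eq_mul_left (Nat.succ_pos k) key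

-- The WZ certificate sequence: G(0)=0, G(k+1) = (-1)^k (k+2) C(M+1,k) Cat(k+1).
def Gz (M : Nat) : Nat → Int
  | 0 => 0
  | (k+1) => (-1 : Int) ^ k * ((k : Int) + 2) * (Nat.choose (M + 1) k : Int) * (catalan (k + 1) : Int)

-- Pointwise telescoping (WZ certificate) identity, valid for k ≤ M + 2.
theorem pointwise (M k : Nat) (hk : k ≤ M + 2) :
    ((M : Int) + 3) * (-1 : Int) ^ k * (Nat.choose (M + 2) k : Int) * (catalan k : Int)
      + 2 * ((M : Int) + 1) * (-1 : Int) ^ k * (Nat.choose (M + 1) k : Int) * (catalan k : Int)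
      - 3 * ((M : Int) + 1) * (-1 : Int) ^ k * (Nat.choose M k : Int) * (catalan k : Int)
    = Gz M (k + 1) - Gz M k := by
  match k with
  | 0 =>
      norm_num [Gz, catalan_one]
      ring
  | (j+1) =>
      have hjM : j ≤ M + 1 := by omega
      have e1 : (Nat.choose (M + 2) (j + 1) : Int)
          = (Nat.choose (M + 1) j : Int) + (Nat.choose (M + 1) (j + 1) : Int) := by
        rw [show M + 2 = (M + 1) + 1 from rfl, Nat.choose_succ_succ]; push_cast; ring
      have e2 : (Nat.choose (M + 1) (j + 1) : Int)
          = (Nat.choose M j : Int) + (Nat.choose M (j + 1) : Int) := by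
        rw [Nat.choose_succ_succ]; push_cast; ring
      have e3 : ((M : Int) + 1) * (Nat.choose M j : Int)
          = (Nat.choose (M + 1) (j + 1) : Int) * ((j : Int) + 1) := by
        exact_mod_cast congrArg (Nat.cast : Nat → Int) (Nat.add_one_mul_choose_eq M j)
      have e5 : (Nat.choose (M + 1) (j + 1) : Int) * ((j : Int) + 1)
          = (Nat.choose (M + 1) j : Int) * ((M : Int) + 1 - (j : Int)) := by
        have h := Nat.choose_succ_right_eq (M + 1) j
        zify [hjM] at h
        linear_combination h
      have ecat : ((j : Int) + 3) * (catalan (j + 2) : Int)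
          = (4 * (j : Int) + 6) * (catalan (j + 1) : Int) := by
        have := congrArg (Nat.cast : Nat → Int) (catRec (j + 1))
        push_cast at this; linarith [this]
      show _ = (-1 : Int) ^ (j+1) * ((j : Int) + 1 + 2) * (Nat.choose (M + 1) (j+1) : Int) * (catalan (j + 2) : Int)
             - (-1 : Int) ^ j * ((j : Int) + 2) * (Nat.choose (M + 1) j : Int) * (catalan (j + 1) : Int)
      rw [pow_succ]
      linear_combination ((-1:Int)^j * (-1) * (catalan (j+1) : Int) * ((M:Int)+3)) * e1
        + ((-1:Int)^j * (-1) * (catalan (j+1) : Int) * 3 * ((M:Int)+1)) * e2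
        + ((-1:Int)^j * (-1) * (catalan (j+1) : Int) * 3) * e3
        + ((-1:Int)^j * (catalan (j+1) : Int)) * e5
        + ((-1:Int)^j * (Nat.choose (M+1) (j+1) : Int)) * ecat

theorem keyRecT (M : Nat) :
    ((M : Int) + 3) * Tz (M + 2) + 2 * ((M : Int) + 1) * Tz (M + 1)
      - 3 * ((M : Int) + 1) * Tz M = 0 := by
  have tele : ∑ k ∈ Finset.range (M + 3), (Gz M (k + 1) - Gz M k) = Gz M (M + 3) - Gz M 0 :=
    Finset.sum_range_sub (Gz M) (M + 3)
  have hz : Gz M (M + 3) = 0 := by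
    show (-1 : Int) ^ (M + 2) * ((M : Int) + 2 + 2) * (Nat.choose (M + 1) (M + 2) : Int) * (catalan (M + 3) : Int) = 0
    rw [Nat.choose_eq_zero_of_lt (by omega)]
    push_cast; ring
  have hsum : ∑ k ∈ Finset.range (M + 3),
      (((M : Int) + 3) * (-1 : Int) ^ k * (Nat.choose (M + 2) k : Int) * (catalan k : Int)
        + 2 * ((M : Int) + 1) * (-1 : Int) ^ k * (Nat.choose (M + 1) k : Int) * (catalan k : Int)
        - 3 * ((M : Int) + 1) * (-1 : Int) ^ k * (Nat.choose M k : Int) * (catalan k : Int)) = 0 := by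
    rw [Finset.sum_congr rfl (fun k hk => pointwise M k (by
      have := Finset.mem_range.mp hk; omega)), tele, hz]
    simp [Gz]
  have split : ∑ k ∈ Finset.range (M + 3),
      (((M : Int) + 3) * (-1 : Int) ^ k * (Nat.choose (M + 2) k : Int) * (catalan k : Int)
        + 2 * ((M : Int) + 1) * (-1 : Int) ^ k * (Nat.choose (M + 1) k : Int) * (catalan k : Int)
        - 3 * ((M : Int) + 1) * (-1 : Int) ^ k * (Nat.choose M k : Int) * (catalan k : Int))
      = ((M : Int) + 3) * Tz (M + 2) + 2 * ((M : Int) + 1) * Tz (M + 1)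
        - 3 * ((M : Int) + 1) * Tz M := by
    rw [Finset.sum_sub_distrib, Finset.sum_add_distrib]
    have h1 : ∑ k ∈ Finset.range (M + 3),
        ((M : Int) + 3) * (-1 : Int) ^ k * (Nat.choose (M + 2) k : Int) * (catalan k : Int)
        = ((M : Int) + 3) * Tz (M + 2) := by
      rw [Tz, Finset.mul_sum]
      exact Finset.sum_congr rfl (fun k _ => by ring)
    have h2 : ∑ k ∈ Finset.range (M + 3),
        2 * ((M : Int) + 1) * (-1 : Int) ^ k * (Nat.choose (M + 1) k : Int) * (catalan k : Int)
        = 2 * ((M : Int) + 1) * Tz (M + 1) := by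
      rw [show M + 3 = (M + 2) + 1 from rfl, Finset.sum_range_succ,
          Nat.choose_eq_zero_of_lt (show M + 1 < M + 2 by omega), Tz, Finset.mul_sum]
      simp only [Nat.cast_zero, mul_zero, zero_mul, add_zero]
      exact Finset.sum_congr rfl (fun k _ => by ring)
    have h3 : ∑ k ∈ Finset.range (M + 3),
        3 * ((M : Int) + 1) * (-1 : Int) ^ k * (Nat.choose M k : Int) * (catalan k : Int)
        = 3 * ((M : Int) + 1) * Tz M := by
      rw [show M + 3 = (M + 2) + 1 from rfl, Finset.sum_range_succ,
          show M + 2 = (M + 1) + 1 from rfl, Finset.sum_range_succ,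
          Nat.choose_eq_zero_of_lt (show M < M + 2 by omega),
          Nat.choose_eq_zero_of_lt (show M < M + 1 by omega), Tz, Finset.mul_sum]
      simp only [Nat.cast_zero, mul_zero, zero_mul, add_zero]
      exact Finset.sum_congr rfl (fun k _ => by ring)
    rw [h1, h2, h3]
  rw [split] at hsum
  exact hsum


theorem keyRecS (M : Nat) :
    ((M : Int) + 4) * Sz (M + 3) = ((M : Int) + 2) * (2 * Sz (M + 2) + 3 * Sz (M + 1)) := by
  have h := keyRecT (M + 1)
  push_cast at h
  unfold Sz
  rw [show M + 3 = (M + 1) + 2 from rfl]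
  rw [pow_succ, pow_succ, show M + 2 = (M + 1) + 1 from rfl, pow_succ]
  linear_combination ((-1 : Int) ^ (M + 1)) * h


-- A's recurrence values equal the closed form.
theorem rrEq : ∀ m : Nat, rr m = Sz m
  | 0 => by simp [rr, Sz, Tz]
  | 1 => by
      simp [rr, Sz, Tz, Finset.sum_range_succ, catalan_one]
  | 2 => by
      norm_num [rr, Sz, Tz, Finset.sum_range_succ, catalan_one, catalan_two]
  | (m+3) => by
      have h2 := rrEq (m+2)
      have h1 := rrEq (m+1)
      show PySem.Int.floordiv (((m : Int) + 2) * (2 * rr (m+2) + 3 * rr (m+1))) ((m : Int) + 4) = Sz (m+3)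
      rw [h2, h1, show ((m : Int) + 2) * (2 * Sz (m+2) + 3 * Sz (m+1)) = ((m : Int) + 4) * Sz (m+3) from (keyRecS m).symm,
          PySem.Int.floordiv_eq_ediv_of_pos (by omega)]
      exact Int.mul_ediv_cancel_left _ (by omega)

-- A's first loop builds exactly [rr 0, rr 1, …, rr (3+t-1)].
theorem buildA (t : Nat) :
    (PySem.List.pyRange 3 (3 + (t : Int)) 1).foldl
      (fun R k =>
        let num := (k - 1) * (2 * PySem.List.pyGetD R (k - 1) 0 + 3 * PySem.List.pyGetD R (k - 2) 0)
        R ++ [PySem.Int.floordiv num (k + 1)])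
      [1, 0, 1]
    = (List.range (3 + t)).map rr := by
  induction t with
  | zero =>
      rw [show ((3 : Int) + (0 : Nat)) = 3 by norm_num, PySem.List.pyRange_one_eq_nil (by omega)]
      decide
  | succ t ih =>
      rw [show ((3 : Int) + ((t + 1 : Nat) : Int)) = (3 + (t : Int)) + 1 by push_cast; ring,
          PySem.List.pyRange_one_succ_right (by omega), List.foldl_append, ih]
      simp only [List.foldl]
      have hlen : ((List.range (3 + t)).map rr).length = 3 + t := by simp
      rw [show ((3 : Int) + (t : Int)) - 1 = ((t + 2 : Nat) : Int) by push_cast; ring,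
          show ((3 : Int) + (t : Int)) - 2 = ((t + 1 : Nat) : Int) by push_cast; ring,
          PySem.List.pyGetD_natCast, PySem.List.pyGetD_natCast,
          PySem.List.getD_map_range rr (3 + t) (t + 2) 0 (by omega),
          PySem.List.getD_map_range rr (3 + t) (t + 1) 0 (by omega)]
      rw [show (3 + (t + 1)) = (3 + t) + 1 by ring, List.range_succ, List.map_append]
      congr 1
      simp only [List.map]
      congr 1
      rw [show (3 + t) = t + 3 by ring,
          show rr (t + 3) = PySem.Int.floordiv (((t : Int) + 2) * (2 * rr (t+2) + 3 * rr (t+1))) ((t : Int) + 4) from rfl]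
      congr 1
      ring


-- B's Motzkin sequence: mz k = M(k).
def mz : Nat → Int
  | 0 => 1
  | 1 => 1
  | (n+2) => PySem.Int.floordiv ((2 * (n : Int) + 5) * mz (n+1) + 3 * ((n : Int) + 1) * mz n) ((n : Int) + 4)

-- The Motzkin recurrence for the pairs Sz q + Sz (q+1), a linear consequence of keyRecS.
theorem identM (n : Nat) :
    ((n : Int) + 4) * (Sz (n+2) + Sz (n+3))
      = (2 * (n : Int) + 5) * (Sz (n+1) + Sz (n+2)) + 3 * ((n : Int) + 1) * (Sz n + Sz (n+1)) := by
  cases n with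
  | zero =>
      norm_num [Sz, Tz, Finset.sum_range_succ, catalan_one, catalan_two, catalan_three]
  | succ j =>
      have h1 := keyRecS (j + 1)
      have h2 := keyRecS j
      push_cast at h1 h2 ⊢
      linear_combination h1 + h2

-- B's Motzkin values equal the Riordan pair sums.
theorem mzEq : ∀ n : Nat, mz n = Sz n + Sz (n+1)
  | 0 => by norm_num [mz, Sz, Tz, Finset.sum_range_succ, catalan_one]
  | 1 => by norm_num [mz, Sz, Tz, Finset.sum_range_succ, catalan_one, catalan_two]
  | (n+2) => by
      have ih1 := mzEq (n+1)
      have ih0 := mzEq n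
      show PySem.Int.floordiv ((2 * (n : Int) + 5) * mz (n+1) + 3 * ((n : Int) + 1) * mz n) ((n : Int) + 4) = _
      rw [ih1, ih0,
          show (2 * (n : Int) + 5) * (Sz (n+1) + Sz (n+2)) + 3 * ((n : Int) + 1) * (Sz n + Sz (n+1))
             = ((n : Int) + 4) * (Sz (n+2) + Sz (n+3)) from (identM n).symm,
          PySem.Int.floordiv_eq_ediv_of_pos (by omega)]
      exact Int.mul_ediv_cancel_left _ (by omega)

-- B's first loop builds exactly [mz 0, mz 1, …, mz (2+t-1)].
theorem buildM (t : Nat) :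
    (PySem.List.pyRange 2 (2 + (t : Int)) 1).foldl
      (fun motzkin k =>
        motzkin ++ [PySem.Int.floordiv
          ((2 * k + 1) * PySem.List.pyGetD motzkin (k - 1) 0
            + 3 * (k - 1) * PySem.List.pyGetD motzkin (k - 2) 0) (k + 2)])
      [1, 1]
    = (List.range (2 + t)).map mz := by
  induction t with
  | zero =>
      rw [show ((2 : Int) + (0 : Nat)) = 2 by norm_num, PySem.List.pyRange_one_eq_nil (by omega)]
      decide
  | succ t ih =>
      rw [show ((2 : Int) + ((t + 1 : Nat) : Int)) = (2 + (t : Int)) + 1 by push_cast; ring,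
          PySem.List.pyRange_one_succ_right (by omega), List.foldl_append, ih]
      simp only [List.foldl]
      rw [show ((2 : Int) + (t : Int)) - 1 = ((t + 1 : Nat) : Int) by push_cast; ring,
          show ((2 : Int) + (t : Int)) - 2 = ((t : Nat) : Int) by ring,
          PySem.List.pyGetD_natCast, PySem.List.pyGetD_natCast,
          PySem.List.getD_map_range mz (2 + t) (t + 1) 0 (by omega),
          PySem.List.getD_map_range mz (2 + t) t 0 (by omega)]
      rw [show (2 + (t + 1)) = (2 + t) + 1 by ring, List.range_succ, List.map_append]
      congr 1
      simp only [List.map]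
      congr 1
      rw [show (2 + t) = t + 2 by ring,
          show mz (t + 2) = PySem.Int.floordiv ((2 * (t : Int) + 5) * mz (t+1) + 3 * ((t : Int) + 1) * mz t) ((t : Int) + 4) from rfl]
      congr 1
      · push_cast; ring
      · ring

-- B's second loop invariant: after processing q = 1 .. u the state is
-- (the dims already emitted, Sz u).
theorem buildD (t : Nat) : ∀ u : Nat, u ≤ t + 2 →
    (PySem.List.pyRange 1 (1 + (u : Int)) 1).foldl
      (fun (st : List Int × Int) q =>
        let r := PySem.List.pyGetD ((List.range (2 + t)).map mz) (q - 1) 0 - st.2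
        (if 4 ≤ q then st.1 ++ [if q = 5 then 5 else r] else st.1, r))
      ([], 1)
    = ((PySem.List.pyRange 4 (1 + (u : Int)) 1).map
        (fun q => if q = 5 then (5 : Int) else Sz q.toNat), Sz u)
  | 0, _ => by
      rw [show (1 : Int) + ((0 : Nat) : Int) = 1 by norm_num,
          PySem.List.pyRange_one_eq_nil (show (1:Int) ≤ 1 by omega),
          PySem.List.pyRange_one_eq_nil (show (1:Int) ≤ 4 by omega)]
      norm_num [Sz, Tz]
  | (u+1), hu => by
      have ih := buildD t u (by omega)
      rw [show (1 : Int) + ((u + 1 : Nat) : Int) = (1 + (u : Int)) + 1 by push_cast; ring,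
          PySem.List.pyRange_one_succ_right (by omega), List.foldl_append, ih]
      simp only [List.foldl]
      have hr : PySem.List.pyGetD ((List.range (2 + t)).map mz) (1 + (u : Int) - 1) 0 - Sz u
          = Sz (u + 1) := by
        rw [show (1 : Int) + (u : Int) - 1 = ((u : Nat) : Int) by ring,
            PySem.List.pyGetD_natCast,
            PySem.List.getD_map_range mz (2 + t) u 0 (by omega),
            mzEq u]
        ring
      rw [hr]
      refine Prod.ext ?_ (by norm_num)
      by_cases h4 : 3 ≤ u
      · rw [if_pos (show (4:Int) ≤ 1 + u by omega),
            PySem.List.pyRange_one_succ_right (show (4:Int) ≤ 1 + u by omega),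
            List.map_append]
        simp only [List.map]
        have : ((1:Int) + (u:Int)).toNat = u + 1 := by omega
        rw [this]
      · rw [if_neg (show ¬ (4:Int) ≤ 1 + u by omega),
            PySem.List.pyRange_one_eq_nil (show 1 + (u:Int) ≤ 4 by omega),
            PySem.List.pyRange_one_eq_nil (show 1 + (u:Int) + 1 ≤ 4 by omega)]

-- ===== VERDICT (by name: the statement is the Claim_ definition above) =====
theorem sl2_bar_dims_spec : Claim_equal_sl2_bar_dims := by
  intro n_max _
  show sl2_bar_dims n_max = sl2_bar_dims_alt n_max
  by_cases h0 : -1 ≤ n_max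
  · obtain ⟨t, ht⟩ : ∃ t : Nat, n_max + 1 = (t : Int) := ⟨(n_max + 1).toNat, by omega⟩
    unfold sl2_bar_dims sl2_bar_dims_alt
    rw [show n_max + 4 = 3 + (t : Int) by omega, buildA t,
        show n_max + 3 = 2 + (t : Int) by omega, buildM t]
    simp only []
    rw [show (3 : Int) + (t : Int) = 1 + ((t + 2 : Nat) : Int) by push_cast; ring,
        buildD t (t + 2) (le_refl _)]
    simp only []
    rw [PySem.List.foldl_append_singleton_eq_map
        (fun n => if n = 2 then (5 : Int)
                  else PySem.List.pyGetD ((List.range (3 + t)).map rr) (n + 3) 0)]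
    rw [List.nil_append,
        show n_max + 1 = (t : Int) from ht,
        show (1 : Int) + ((t + 2 : Nat) : Int) = 4 + ((t : Int) - 1) by push_cast; ring]
    rw [PySem.List.pyRange_one (1 : Int) (t : Int),
        PySem.List.pyRange_one (4 : Int) (4 + ((t : Int) - 1)),
        List.map_map, List.map_map]
    have hlen : ((t : Int) - 1).toNat = ((4 + ((t : Int) - 1)) - 4).toNat := by omega
    rw [← hlen]
    apply List.map_congr_left
    intro j hj
    have hjt : j < t - 1 := by
      have := List.mem_range.mp hj; omega
    simp only [Function.comp_apply]
    by_cases hj1 : j = 1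
    · subst hj1; norm_num
    · rw [if_neg (show ¬ ((1:Int) + (j : Nat) = 2) by omega),
          if_neg (show ¬ ((4:Int) + (j : Nat) = 5) by omega),
          show (1 : Int) + (j : Nat) + 3 = ((4 + j : Nat) : Int) by push_cast; ring,
          PySem.List.pyGetD_natCast,
          PySem.List.getD_map_range rr (3 + t) (4 + j) 0 (by omega),
          show ((4:Int) + (j : Nat)).toNat = 4 + j by omega,
          rrEq (4 + j)]
  · by_cases hm2 : n_max = -2
    · subst hm2; decide
    · unfold sl2_bar_dims sl2_bar_dims_alt
      rw [PySem.List.pyRange_one_eq_nil (show n_max + 1 ≤ 1 by omega),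
          PySem.List.pyRange_one_eq_nil (show n_max + 3 ≤ 2 by omega),
          PySem.List.pyRange_one_eq_nil (show n_max + 4 ≤ 1 by omega)]
      rfl
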